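-- pv_equiv track=rewrite | github.com/univieCUBE/PyCoMo | pycomo/utils.py | list_of_strings_is_self_contained
-- ===== SOURCE A (Python) =====
-- def list_of_strings_is_self_contained(str_list):
--     self_contained = False
--     for idx, string in enumerate(str_list):
--         for other_idx in range(len(str_list)):
--             if idx == other_idx: continue
--             elif string in str_list[other_idx]:
--                 self_contained = True
--     return self_contained
-- ===== SOURCE B (Python) =====
-- def list_of_strings_is_self_contained(str_list):
--     # Early exit on any duplicate; otherwise sort the distinct strings by
--     # length and only test each string against the strictly-longer ones.
--     uniq = []
--     for s in str_list:
--         if s in uniq: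
--             return True
--         uniq.append(s)
--     uniq.sort(key=len)
--     for i, s in enumerate(uniq):
--         for t in uniq[i + 1:]:
--             if s in t:
--                 return True
--     return False
-- ===== Notes on version B (the rewrite author's own statement) =====
-- stated objective: faster
-- what changed: Instead of testing every ordered pair with a flag and no exit, B returns True immediately on the first duplicate, then sorts the distinct strings by length and tests each string for containment only in the strings after it (the strictly longer ones), exiting on the first hit.
import Mathlib
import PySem

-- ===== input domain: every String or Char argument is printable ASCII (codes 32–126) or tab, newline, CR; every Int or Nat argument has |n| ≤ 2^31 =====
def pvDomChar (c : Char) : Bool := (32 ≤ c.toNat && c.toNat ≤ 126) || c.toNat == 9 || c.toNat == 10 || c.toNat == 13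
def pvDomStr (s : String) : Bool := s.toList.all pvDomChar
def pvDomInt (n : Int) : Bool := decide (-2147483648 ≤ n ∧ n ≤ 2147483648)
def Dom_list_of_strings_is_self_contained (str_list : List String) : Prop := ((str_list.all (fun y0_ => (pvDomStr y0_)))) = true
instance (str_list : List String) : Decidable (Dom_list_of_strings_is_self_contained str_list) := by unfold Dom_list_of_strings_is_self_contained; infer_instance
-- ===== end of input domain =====

-- B replaces A's exhaustive ordered-pair scan with duplicate detection (early exit)
-- followed by a length-sorted scan of the distinct strings that tests containment
-- only against the strictly longer strings; same result, alternative algorithm.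

-- ===== PORT A =====
def list_of_strings_is_self_contained (str_list : List String) : Bool :=
  (PySem.List.enumerate str_list 0).foldl
    (fun self_contained p =>
      (PySem.List.pyRange 0 str_list.length 1).foldl
        (fun self_contained other_idx =>
          if p.1 == other_idx then self_contained
          else if PySem.Str.isIn p.2 (PySem.List.pyGetD str_list other_idx "") then true
          else self_contained)
        self_contained)
    false

-- ===== PORT B =====
-- first loop of Source B: early-return True (none) on a duplicate, else the dedup'd list
def lsc_dedup (uniq : List String) : List String → Option (List String)
  | [] => some uniq
  | s :: rest => if uniq.contains s then none else lsc_dedup (uniq ++ [s]) rest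

-- inner loop of Source B: does s occur in any element of l?
def lsc_inner (s : String) : List String → Bool
  | [] => false
  | t :: rest => if PySem.Str.isIn s t then true else lsc_inner s rest

-- outer loop of Source B over the sorted list: each string vs the strings after it
def lsc_outer : List String → Bool
  | [] => false
  | s :: rest => if lsc_inner s rest then true else lsc_outer rest

def list_of_strings_is_self_contained_alt (str_list : List String) : Bool :=
  match lsc_dedup [] str_list with
  | none => true
  | some uniq => lsc_outer (PySem.List.sorted uniq PySem.Str.len false)

-- ===== PRECONDITION & SPEC =====
def Spec_list_of_strings_is_self_contained (str_list : List String) (out : Bool) : Prop := out = list_of_strings_is_self_contained_alt str_list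
instance (str_list : List String) (out : Bool) : Decidable (Spec_list_of_strings_is_self_contained str_list out) := by unfold Spec_list_of_strings_is_self_contained; infer_instance

-- ===== CLAIM (what is proved, stated in full; the proofs are below) =====
def Claim_equal_list_of_strings_is_self_contained : Prop := ∀ (str_list : List String), Dom_list_of_strings_is_self_contained str_list → Spec_list_of_strings_is_self_contained str_list (list_of_strings_is_self_contained str_list)

-- ===== LEMMAS AND PROOFS =====

-- both programs compute this proposition: some duplicate, or a proper containment
def lscC (xs : List String) : Prop :=
  (¬ xs.Nodup) ∨ ∃ s ∈ xs, ∃ t ∈ xs, s ≠ t ∧ PySem.Str.isIn s t = true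

-- a fold that only ever raises its Boolean flag is an `any`
theorem foldl_or {α : Type} (g : α → Bool) :
    ∀ (l : List α) (init : Bool),
      l.foldl (fun b x => b || g x) init = (init || l.any g) := by
  intro l
  induction l with
  | nil => simp
  | cons x xs ih =>
    intro init
    simp only [List.foldl_cons, List.any_cons]
    rw [ih, Bool.or_assoc]

theorem foldl_ite_or {α : Type} (p q : α → Bool) :
    ∀ (l : List α) (init : Bool),
      l.foldl (fun b x => if p x then b else if q x then true else b) init
        = (init || l.any fun x => !p x && q x) := by
  intro l init
  have hf : (fun (b : Bool) (x : α) => if p x then b else if q x then true else b)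
      = (fun (b : Bool) (x : α) => b || (!p x && q x)) := by
    funext b x
    cases p x <;> cases q x <;> simp
  rw [hf, foldl_or]

theorem A_eq_any (xs : List String) :
    list_of_strings_is_self_contained xs
      = (PySem.List.enumerate xs 0).any (fun p =>
          (PySem.List.pyRange 0 xs.length 1).any (fun j =>
            !(p.1 == j) && PySem.Str.isIn p.2 (PySem.List.pyGetD xs j ""))) := by
  unfold list_of_strings_is_self_contained
  have h : ∀ (l : List (Int × String)) (init : Bool),
      l.foldl (fun b p =>
        (PySem.List.pyRange 0 xs.length 1).foldl
          (fun b j => if p.1 == j then b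
            else if PySem.Str.isIn p.2 (PySem.List.pyGetD xs j "") then true else b) b) init
        = (init || l.any (fun p =>
            (PySem.List.pyRange 0 xs.length 1).any (fun j =>
              !(p.1 == j) && PySem.Str.isIn p.2 (PySem.List.pyGetD xs j "")))) := by
    intro l
    induction l with
    | nil => simp
    | cons p l ih =>
      intro init
      simp only [List.foldl_cons, List.any_cons]
      rw [foldl_ite_or (fun j => p.1 == j)
        (fun j => PySem.Str.isIn p.2 (PySem.List.pyGetD xs j "")), ih, Bool.or_assoc]
  rw [h]
  simp

theorem A_true_iff (xs : List String) :
    list_of_strings_is_self_contained xs = true ↔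
      ∃ (k m : Nat), ∃ (hk : k < xs.length) (hm : m < xs.length),
        k ≠ m ∧ PySem.Str.isIn xs[k] xs[m] = true := by
  rw [A_eq_any, List.any_eq_true]
  constructor
  · rintro ⟨p, hp, hbody⟩
    rw [PySem.List.mem_enumerate_iff] at hp
    obtain ⟨k, hk, rfl⟩ := hp
    rw [List.any_eq_true] at hbody
    obtain ⟨j, hj, hcond⟩ := hbody
    rw [PySem.List.mem_pyRange_one] at hj
    simp only [Bool.and_eq_true, Bool.not_eq_eq_eq_not, Bool.not_true, beq_eq_false_iff_ne] at hcond
    obtain ⟨hne, hin⟩ := hcond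
    have hjlt : j < (xs.length : Int) := hj.2
    refine ⟨k, j.toNat, hk, by omega, ?_, ?_⟩
    · intro hkm
      apply hne
      simp only [zero_add]
      omega
    · rw [PySem.List.pyGetD_eq_getElem xs "" hj.1 hjlt] at hin
      exact hin
  · rintro ⟨k, m, hk, hm, hkm, hin⟩
    refine ⟨((k : Int), xs[k]), ?_, ?_⟩
    · rw [PySem.List.mem_enumerate_iff]
      exact ⟨k, hk, by simp⟩
    · rw [List.any_eq_true]
      refine ⟨(m : Int), ?_, ?_⟩
      · rw [PySem.List.mem_pyRange_one]; constructor <;> omega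
      · have hg : PySem.List.pyGetD xs ((m : Int)) "" = xs[m] := by
          rw [PySem.List.pyGetD_eq_getElem xs "" (by omega) (by exact_mod_cast hm)]
          simp
        simp only [hg, hin, Bool.and_true, Bool.not_eq_eq_eq_not, Bool.not_true,
          beq_eq_false_iff_ne]
        intro h
        exact hkm (by omega)

theorem idx_iff_C (xs : List String) :
    (∃ (k m : Nat), ∃ (hk : k < xs.length) (hm : m < xs.length),
        k ≠ m ∧ PySem.Str.isIn xs[k] xs[m] = true) ↔ lscC xs := by
  constructor
  · rintro ⟨k, m, hk, hm, hkm, hin⟩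
    by_cases heq : xs[k] = xs[m]
    · left
      intro hnd
      exact hkm ((hnd.getElem_inj_iff).mp heq)
    · right
      exact ⟨xs[k], List.getElem_mem hk, xs[m], List.getElem_mem hm, heq, hin⟩
  · rintro (hnd | ⟨s, hs, t, ht, hne, hin⟩)
    · rw [List.nodup_iff_getElem?_ne_getElem?] at hnd
      push Not at hnd
      obtain ⟨i, j, hij, hjlt, heq⟩ := hnd
      have hilt : i < xs.length := lt_trans hij hjlt
      refine ⟨i, j, hilt, hjlt, Nat.ne_of_lt hij, ?_⟩
      have heq' : xs[i] = xs[j] := by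
        rw [List.getElem?_eq_getElem hilt, List.getElem?_eq_getElem hjlt] at heq
        exact Option.some.inj heq
      rw [heq']
      exact (PySem.Str.isIn_iff_infix _ _).mpr (List.infix_refl _)
    · obtain ⟨k, hk, hks⟩ := List.mem_iff_getElem.mp hs
      obtain ⟨m, hm, hmt⟩ := List.mem_iff_getElem.mp ht
      refine ⟨k, m, hk, hm, ?_, by rw [hks, hmt]; exact hin⟩
      intro h
      subst h
      exact hne (hks.symm.trans hmt)

-- substring of a DIFFERENT string is strictly shorter
theorem isIn_length_lt {s t : String} (h : PySem.Str.isIn s t = true) (hne : s ≠ t) :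
    s.toList.length < t.toList.length := by
  have hinf := (PySem.Str.isIn_iff_infix s t).mp h
  have hsub := hinf.sublist
  have hle := hsub.length_le
  rcases lt_or_eq_of_le hle with hlt | heq
  · exact hlt
  · exact absurd (String.toList_inj.mp (hsub.eq_of_length heq)) hne

theorem dedup_spec : ∀ (rest uniq : List String), uniq.Nodup →
    lsc_dedup uniq rest = (if (uniq ++ rest).Nodup then some (uniq ++ rest) else none) := by
  intro rest
  induction rest with
  | nil => intro uniq h; simp [lsc_dedup, h]
  | cons s rest ih =>
    intro uniq h
    unfold lsc_dedup
    by_cases hmem : s ∈ uniq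
    · have : ¬ (uniq ++ s :: rest).Nodup := by
        intro hnd
        exact (List.disjoint_of_nodup_append hnd) hmem List.mem_cons_self
      simp [hmem, this]
    · have hnd' : (uniq ++ [s]).Nodup := by
        rw [List.nodup_append]
        refine ⟨h, List.nodup_singleton s, ?_⟩
        intro a ha b hb
        rw [List.mem_singleton] at hb
        subst hb
        exact fun h' => hmem (h' ▸ ha)
      rw [if_neg (by simpa using hmem), ih (uniq ++ [s]) hnd']
      simp

theorem inner_false_iff (s : String) : ∀ (l : List String),
    lsc_inner s l = false ↔ ∀ t ∈ l, PySem.Str.isIn s t = false := by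
  intro l
  induction l with
  | nil => simp [lsc_inner]
  | cons t rest ih =>
    unfold lsc_inner
    by_cases h : PySem.Str.isIn s t = true
    · rw [if_pos h]
      constructor
      · intro hf; exact absurd hf (by simp)
      · intro hall
        exact absurd (hall t List.mem_cons_self) (by rw [h]; simp)
    · rw [Bool.not_eq_true] at h
      rw [if_neg (by rw [h]; simp), ih]
      constructor
      · intro hall t' ht'
        rcases List.mem_cons.mp ht' with rfl | ht'
        · exact h
        · exact hall t' ht'
      · intro hall t' ht'
        exact hall t' (List.mem_cons_of_mem _ ht')

theorem outer_false_iff : ∀ (l : List String),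
    lsc_outer l = false ↔ l.Pairwise (fun a b => PySem.Str.isIn a b = false) := by
  intro l
  induction l with
  | nil => simp [lsc_outer]
  | cons s rest ih =>
    unfold lsc_outer
    rw [List.pairwise_cons]
    by_cases h : lsc_inner s rest = true
    · rw [if_pos h]
      constructor
      · intro hfalse; exact absurd hfalse (by simp)
      · rintro ⟨hall, _⟩
        exact absurd ((inner_false_iff s rest).mpr hall) (by rw [h]; simp)
    · rw [Bool.not_eq_true] at h
      rw [if_neg (by rw [h]; simp), ih]
      rw [inner_false_iff] at h
      constructor
      · intro hpw; exact ⟨h, hpw⟩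
      · rintro ⟨_, hpw⟩; exact hpw

theorem B_true_iff (xs : List String) :
    list_of_strings_is_self_contained_alt xs = true ↔ lscC xs := by
  unfold list_of_strings_is_self_contained_alt
  rw [dedup_spec xs [] List.nodup_nil]
  simp only [List.nil_append]
  by_cases hnd : xs.Nodup
  · rw [if_pos hnd]
    show lsc_outer (PySem.List.sorted xs PySem.Str.len false) = true ↔ lscC xs
    have hperm : (PySem.List.sorted xs PySem.Str.len false).Perm xs :=
      PySem.List.sorted_perm xs PySem.Str.len false
    have hslnd : (PySem.List.sorted xs PySem.Str.len false).Nodup := (hperm.nodup_iff).mpr hnd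
    have hlen : (PySem.List.sorted xs PySem.Str.len false).Pairwise
        (fun a b => PySem.Str.len a ≤ PySem.Str.len b) :=
      PySem.List.sorted_pairwise xs PySem.Str.len
    constructor
    · intro houter
      have hnp : ¬ (PySem.List.sorted xs PySem.Str.len false).Pairwise
          (fun a b => PySem.Str.isIn a b = false) := by
        intro hpw
        rw [← outer_false_iff] at hpw
        rw [hpw] at houter
        exact absurd houter (by simp)
      rw [List.pairwise_iff_getElem] at hnp
      push Not at hnp
      obtain ⟨i, j, hi, hj, hij, hne⟩ := hnp
      rw [Bool.ne_false_iff] at hne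
      right
      refine ⟨_, hperm.mem_iff.mp (List.getElem_mem hi),
              _, hperm.mem_iff.mp (List.getElem_mem hj), ?_, hne⟩
      intro heq
      exact absurd ((hslnd.getElem_inj_iff).mp heq) (Nat.ne_of_lt hij)
    · rintro (h | ⟨s, hs, t, ht, hne, hin⟩)
      · exact absurd hnd h
      · have hin' : PySem.Str.isIn s t = true := hin
        by_contra houter
        rw [Bool.not_eq_true, outer_false_iff, List.pairwise_iff_getElem] at houter
        rw [List.pairwise_iff_getElem] at hlen
        obtain ⟨i, hi, his⟩ := List.mem_iff_getElem.mp ((PySem.List.mem_sorted xs PySem.Str.len false s).mpr hs)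
        obtain ⟨j, hj, hjt⟩ := List.mem_iff_getElem.mp ((PySem.List.mem_sorted xs PySem.Str.len false t).mpr ht)
        have hij : i ≠ j := by
          intro h; subst h; exact hne (his.symm.trans hjt)
        rcases Nat.lt_or_ge i j with hlt | hge
        · have hfalse := houter i j hi hj hlt
          rw [his, hjt] at hfalse
          rw [hin'] at hfalse
          exact absurd hfalse (by simp)
        · have hji : j < i := lt_of_le_of_ne hge (Ne.symm hij)
          have hle := hlen j i hj hi hji
          rw [his, hjt] at hle
          have hlt' := isIn_length_lt hin' hne
          rw [PySem.Str.len_eq, PySem.Str.len_eq] at hle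
          omega
  · rw [if_neg hnd]
    simp only [true_iff]
    left
    exact hnd

-- ===== VERDICT (by name: the statement is the Claim_ definition above) =====
theorem list_of_strings_is_self_contained_spec : Claim_equal_list_of_strings_is_self_contained := by
  intro xs _
  unfold Spec_list_of_strings_is_self_contained
  rw [Bool.eq_iff_iff, A_true_iff, B_true_iff, idx_iff_C]
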